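-- pv_equiv track=rewrite | github.com/seoljeongwoo/learn | 프로그래머스/호텔 방 배정.py | solution
-- ===== SOURCE A (Python) =====
-- def find(room, parent):
--     if room not in parent.keys(): return room
--     parent[room] = find(parent[room] , parent)
--     return parent[room]
--
-- def solution(k, room_number):
--     answer = []
--     parent = dict()
--
--     for room in room_number:
--         if room in parent.keys():
--             room = find(room, parent)
--         answer.append(room)
--         parent[room] = find(room+1, parent)
--     return answer
-- ===== SOURCE B (Python) =====
-- def solution(k, room_number):
--     taken = set()
--     answer = []
--     for want in room_number:
--         room = want
--         while room in taken:
--             room += 1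
--         answer.append(room)
--         taken.add(room)
--     return answer
-- ===== Notes on version B (the rewrite author's own statement) =====
-- stated objective: simpler
-- what changed: The union-find structure (recursive find with path compression over a parent dict) is dropped entirely; B keeps only a set of taken rooms and scans upward from the requested room to the first free one.
import Mathlib
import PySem

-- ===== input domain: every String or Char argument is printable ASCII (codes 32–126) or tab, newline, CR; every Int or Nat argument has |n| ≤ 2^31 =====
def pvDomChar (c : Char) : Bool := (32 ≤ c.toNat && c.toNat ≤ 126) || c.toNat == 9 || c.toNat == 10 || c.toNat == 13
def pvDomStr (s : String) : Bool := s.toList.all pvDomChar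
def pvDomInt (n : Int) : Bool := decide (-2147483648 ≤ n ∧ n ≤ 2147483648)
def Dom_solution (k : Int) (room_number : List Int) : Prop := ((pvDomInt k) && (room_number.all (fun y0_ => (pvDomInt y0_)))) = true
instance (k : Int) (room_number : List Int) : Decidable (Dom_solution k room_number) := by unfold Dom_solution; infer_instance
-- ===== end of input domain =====

-- B drops A's union-find (recursive find + path compression over a parent dict)
-- entirely: it keeps only the SET of taken rooms and scans upward from the
-- requested room to the first free one (objective: simpler).
-- Equivalence is about the RETURN value; the internal bookkeeping differs.

-- ===== PORT A =====
-- find(room, parent): recursive, with path compression; the dict is threaded through.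
-- fuel = parent.size + 1 at each call site is a termination guard only: parent chains
-- are strictly increasing over the keys, so it is never exhausted (proved below).
def findA : Nat → Int → PySem.Dict Int Int → Int × PySem.Dict Int Int
  | 0, room, parent => (room, parent)
  | fuel+1, room, parent =>
    match parent.get? room with
    | none => (room, parent)
    | some v =>
      let r := findA fuel v parent
      (r.1, r.2.insert room r.1)   -- parent[room] = find(parent[room]); return parent[room]

def solutionStepA (st : List Int × PySem.Dict Int Int) (room : Int) :
    List Int × PySem.Dict Int Int :=
  let fr := if st.2.contains room then findA (st.2.size + 1) room st.2 else (room, st.2)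
  let fr2 := findA (fr.2.size + 1) (fr.1 + 1) fr.2
  (st.1 ++ [fr.1], fr2.2.insert fr.1 fr2.1)   -- answer.append(room); parent[room] = find(room+1)

def solution (k : Int) (room_number : List Int) : List Int :=
  (room_number.foldl solutionStepA ([], PySem.Dict.empty)).1

-- ===== PORT B =====
-- while room in taken: room += 1   (fuel = len(taken)+1 is a termination guard only:
-- the scan visits distinct taken rooms, so it is never exhausted — proved below)
def scanB : Nat → Int → PySem.Set Int → Int
  | 0, room, _ => room
  | fuel+1, room, taken =>
    if PySem.Set.contains taken room then scanB fuel (room + 1) taken else room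

def solutionStepB (st : List Int × PySem.Set Int) (want : Int) :
    List Int × PySem.Set Int :=
  let room := scanB (st.2.length + 1) want st.2
  (st.1 ++ [room], PySem.Set.add st.2 room)   -- answer.append(room); taken.add(room)

def solution_alt (k : Int) (room_number : List Int) : List Int :=
  (room_number.foldl solutionStepB ([], PySem.Set.empty)).1

-- ===== PRECONDITION & SPEC =====
def Spec_solution (k : Int) (room_number : List Int) (out : List Int) : Prop := out = solution_alt k room_number
instance (k : Int) (room_number : List Int) (out : List Int) : Decidable (Spec_solution k room_number out) := by unfold Spec_solution; infer_instance

-- ===== CLAIM (what is proved, stated in full; the proofs are below) =====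
def Claim_equal_solution : Prop := ∀ (k : Int) (room_number : List Int), Dom_solution k room_number → Spec_solution k room_number (solution k room_number)

-- ===== LEMMAS AND PROOFS =====

-- threshold filters on an Int list: antitone in the threshold, strictly so across a member
lemma filter_thr_mono (l : List Int) {a b : Int} (h : a ≤ b) :
    (l.filter (fun y => decide (b ≤ y))).length ≤ (l.filter (fun y => decide (a ≤ y))).length := by
  induction l with
  | nil => simp
  | cons hd tl ih =>
    by_cases h1 : b ≤ hd
    · have h2 : a ≤ hd := le_trans h h1
      simp [List.filter_cons, h1, h2] <;> omega
    · by_cases h2 : a ≤ hd <;> simp [List.filter_cons, h1, h2] <;> omega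

lemma filter_thr_succ_lt (l : List Int) {x : Int} (hx : x ∈ l) :
    (l.filter (fun y => decide (x + 1 ≤ y))).length < (l.filter (fun y => decide (x ≤ y))).length := by
  rw [show l.filter (fun y => decide (x + 1 ≤ y)) = l.filter (fun y => decide (x < y)) from
    List.filter_congr (fun a _ => decide_eq_decide.mpr (by omega))]
  induction l with
  | nil => simp at hx
  | cons hd tl ih =>
    rcases List.mem_cons.mp hx with h | h
    · have h1 : ¬ x < hd := by omega
      have h2 : x ≤ hd := by omega
      have hmono := filter_thr_mono tl (show x ≤ x + 1 by omega)
      rw [show tl.filter (fun y => decide (x + 1 ≤ y)) = tl.filter (fun y => decide (x < y)) from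
        List.filter_congr (fun a _ => decide_eq_decide.mpr (by omega))] at hmono
      simp [List.filter_cons, h1, h2] <;> omega
    · have := ih h
      by_cases h1 : x < hd
      · have h2 : x ≤ hd := by omega
        simp [List.filter_cons, h1, h2] <;> omega
      · by_cases h2 : x ≤ hd <;> simp [List.filter_cons, h1, h2] <;> omega

-- the "first free room ≥ x" function over a dict's key set
def ffD (d : PySem.Dict Int Int) (x : Int) : Int :=
  if h : d.contains x = true then ffD d (x + 1) else x
termination_by (d.keys.filter (fun y => decide (x ≤ y))).length
decreasing_by
  exact filter_thr_succ_lt d.keys ((PySem.Dict.contains_iff_mem_keys d x).mp h)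

lemma ffD_spec (d : PySem.Dict Int Int) (x : Int) :
    x ≤ ffD d x ∧ d.contains (ffD d x) = false ∧
      ∀ y, x ≤ y → y < ffD d x → d.contains y = true := by
  by_cases h : d.contains x = true
  · have ih := ffD_spec d (x + 1)
    have hrw : ffD d x = ffD d (x + 1) := by rw [ffD]; rw [dif_pos h]
    rw [hrw]
    refine ⟨by have := ih.1; omega, ih.2.1, ?_⟩
    intro y hy1 hy2
    by_cases hyx : y = x
    · subst hyx; exact h
    · exact ih.2.2 y (by omega) hy2
  · have hrw : ffD d x = x := by rw [ffD]; rw [dif_neg h]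
    rw [hrw]
    exact ⟨le_refl x, by simpa using h, fun y hy1 hy2 => absurd hy2 (by omega)⟩
termination_by (d.keys.filter (fun y => decide (x ≤ y))).length
decreasing_by
  exact filter_thr_succ_lt d.keys ((PySem.Dict.contains_iff_mem_keys d x).mp h)

lemma ffD_eq_of (d : PySem.Dict Int Int) (x f : Int) (h1 : x ≤ f)
    (h2 : d.contains f = false)
    (h3 : ∀ y, x ≤ y → y < f → d.contains y = true) : ffD d x = f := by
  obtain ⟨g1, g2, g3⟩ := ffD_spec d x
  rcases lt_trichotomy (ffD d x) f with h | h | h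
  · have := h3 (ffD d x) g1 h; rw [this] at g2; cases g2
  · exact h
  · have := g3 f h1 h; rw [this] at h2; cases h2

lemma ffD_congr (d d' : PySem.Dict Int Int) (x : Int)
    (h : ∀ y, d.contains y = d'.contains y) : ffD d x = ffD d' x := by
  obtain ⟨g1, g2, g3⟩ := ffD_spec d' x
  exact ffD_eq_of d x (ffD d' x) g1 ((h _).trans g2) (fun y hy1 hy2 => (h y).trans (g3 y hy1 hy2))

def GapInv (d : PySem.Dict Int Int) : Prop :=
  ∀ x v, d.get? x = some v → x < v ∧ ∀ y, x < y → y < v → d.contains y = true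

lemma contains_of_get?_some {d : PySem.Dict Int Int} {x : Int} {v : Int}
    (h : d.get? x = some v) : d.contains x = true := by
  rw [PySem.Dict.contains_eq_isSome_get?, h]; rfl

lemma contains_false_of_get?_none {d : PySem.Dict Int Int} {x : Int}
    (h : d.get? x = none) : d.contains x = false := by
  rw [PySem.Dict.contains_eq_isSome_get?, h]; rfl

lemma ffD_gt_of_contains {d : PySem.Dict Int Int} {x : Int}
    (h : d.contains x = true) : x < ffD d x := by
  obtain ⟨g1, g2, _⟩ := ffD_spec d x
  rcases eq_or_lt_of_le g1 with he | hl
  · rw [← he] at g2; rw [h] at g2; cases g2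
  · exact hl

lemma ffD_of_not_contains {d : PySem.Dict Int Int} {x : Int}
    (h : d.contains x = false) : ffD d x = x := by
  rw [ffD]; rw [dif_neg (by simp [h])]

lemma inv_insert_root {p : PySem.Dict Int Int} {a root : Int} (hInv : GapInv p)
    (hc : p.contains a = true) (hff : ffD p a = root) :
    (∀ y, (p.insert a root).contains y = p.contains y) ∧ GapInv (p.insert a root) := by
  have hconts : ∀ y, (p.insert a root).contains y = p.contains y := by
    intro y
    rw [PySem.Dict.contains_insert]
    by_cases hy : y = a
    · simp [hy, hc]
    · simp [hy]
  refine ⟨hconts, ?_⟩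
  subst hff
  intro b w hgb
  rw [PySem.Dict.get?_insert] at hgb
  split_ifs at hgb with hba
  · subst hba
    injection hgb with hw; subst hw
    obtain ⟨g1, g2, g3⟩ := ffD_spec p b
    refine ⟨ffD_gt_of_contains hc, ?_⟩
    intro y hy1 hy2
    rw [hconts]; exact g3 y (by omega) hy2
  · obtain ⟨h1, h2⟩ := hInv b w hgb
    exact ⟨h1, fun y hy1 hy2 => (hconts y).trans (h2 y hy1 hy2)⟩

lemma ffD_step {p : PySem.Dict Int Int} {x v : Int} (hInv : GapInv p)
    (hg : p.get? x = some v) : ffD p x = ffD p v := by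
  have hc : p.contains x = true := contains_of_get?_some hg
  obtain ⟨hxv, hgap⟩ := hInv x v hg
  obtain ⟨g1, g2, g3⟩ := ffD_spec p v
  refine ffD_eq_of p x (ffD p v) (by omega) g2 ?_
  intro y hy1 hy2
  by_cases hyv : v ≤ y
  · exact g3 y hyv hy2
  · by_cases hyx : y = x
    · subst hyx; exact hc
    · exact hgap y (by omega) (by omega)

lemma fuel_step {p : PySem.Dict Int Int} {x v : Int} {fuel : Nat} (hInv : GapInv p)
    (hg : p.get? x = some v)
    (hf : (p.keys.filter (fun y => decide (x ≤ y))).length < fuel + 1) :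
    (p.keys.filter (fun y => decide (v ≤ y))).length < fuel := by
  have hc : p.contains x = true := contains_of_get?_some hg
  have hxv : x < v := (hInv x v hg).1
  have hmem : x ∈ p.keys := (PySem.Dict.contains_iff_mem_keys p x).mp hc
  have h1 := filter_thr_mono p.keys (show x + 1 ≤ v by omega)
  have h2 := filter_thr_succ_lt p.keys hmem
  omega

-- A's find: returns the first free room, preserves the key set (as a list) and the invariant
lemma findA_ok : ∀ (fuel : Nat) (x : Int) (p : PySem.Dict Int Int), GapInv p →
    (p.keys.filter (fun y => decide (x ≤ y))).length < fuel →
    (findA fuel x p).1 = ffD p x ∧ (findA fuel x p).2.keys = p.keys ∧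
      (∀ y, (findA fuel x p).2.contains y = p.contains y) ∧ GapInv (findA fuel x p).2 := by
  intro fuel
  induction fuel with
  | zero => intro x p _ hf; exact absurd hf (Nat.not_lt_zero _)
  | succ fuel ih =>
    intro x p hInv hf
    cases hg : p.get? x with
    | none =>
      have hc : p.contains x = false := contains_false_of_get?_none hg
      simp only [findA, hg]
      refine ⟨(ffD_of_not_contains hc).symm, by simp, by simp, hInv⟩
    | some v =>
      have hc : p.contains x = true := contains_of_get?_some hg
      obtain ⟨e1, e2, e3, e4⟩ := ih v p hInv (fuel_step hInv hg hf)
      have hroot : ffD p x = ffD p v := ffD_step hInv hg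
      have hcx : (findA fuel v p).2.contains x = true := by rw [e3]; exact hc
      have hffx : ffD (findA fuel v p).2 x = (findA fuel v p).1 := by
        rw [ffD_congr _ p x e3, e1, hroot]
      obtain ⟨c1, c2⟩ := inv_insert_root e4 hcx hffx
      simp only [findA, hg]
      refine ⟨by rw [e1, hroot], ?_, fun y => (c1 y).trans (e3 y), c2⟩
      rw [PySem.Dict.keys_insert_of_contains _ _ hcx, e2]

-- appending a fresh key whose value jumps to the next free room keeps the invariant
lemma inv_insert_fresh {p : PySem.Dict Int Int} {a v : Int} (hInv : GapInv p)
    (hav : a < v) (hgap : ∀ y, a < y → y < v → p.contains y = true) :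
    GapInv (p.insert a v) := by
  intro b w hgb
  rw [PySem.Dict.get?_insert] at hgb
  split_ifs at hgb with hba
  · subst hba
    injection hgb with hw; subst hw
    refine ⟨hav, ?_⟩
    intro y hy1 hy2
    rw [PySem.Dict.contains_insert]
    by_cases hya : y = b
    · simp [hya]
    · simp [hya, hgap y hy1 hy2]
  · obtain ⟨h1, h2⟩ := hInv b w hgb
    refine ⟨h1, fun y hy1 hy2 => ?_⟩
    rw [PySem.Dict.contains_insert]
    by_cases hya : y = a
    · simp [hya]
    · simp [hya, h2 y hy1 hy2]

-- B's scan: spec of the returned room (first one whose membership test fails)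
lemma scanB_ok : ∀ (fuel : Nat) (x : Int) (s : PySem.Set Int),
    (s.filter (fun y => decide (x ≤ y))).length < fuel →
    x ≤ scanB fuel x s ∧ PySem.Set.contains s (scanB fuel x s) = false ∧
      ∀ y, x ≤ y → y < scanB fuel x s → PySem.Set.contains s y = true := by
  intro fuel
  induction fuel with
  | zero => intro x s hf; exact absurd hf (Nat.not_lt_zero _)
  | succ fuel ih =>
    intro x s hf
    by_cases hc : PySem.Set.contains s x = true
    · have hmem : x ∈ s := (PySem.Set.contains_iff s x).mp hc
      have hf' := filter_thr_succ_lt s hmem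
      obtain ⟨e1, e2, e3⟩ := ih (x + 1) s (by omega)
      simp only [scanB, hc, if_true]
      refine ⟨by omega, e2, ?_⟩
      intro y hy1 hy2
      by_cases hyx : y = x
      · subst hyx; exact hc
      · exact e3 y (by omega) hy2
    · have hc' : PySem.Set.contains s x = false := by
        cases h : PySem.Set.contains s x
        · rfl
        · exact absurd h hc
      refine ⟨?_, ?_, ?_⟩ <;> simp only [scanB, hc', Bool.false_eq_true, if_false]
      · exact le_refl x
      · exact fun y hy1 hy2 => absurd hy2 (by omega)

lemma set_contains_add (s : PySem.Set Int) (x y : Int) :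
    PySem.Set.contains (PySem.Set.add s x) y = (PySem.Set.contains s y || decide (y = x)) := by
  by_cases h : y ∈ PySem.Set.add s x
  · have h' := (PySem.Set.mem_add s x y).mp h
    have : PySem.Set.contains (PySem.Set.add s x) y = true := (PySem.Set.contains_iff _ y).mpr h
    rw [this]
    rcases h' with h' | h'
    · rw [(PySem.Set.contains_iff s y).mpr h']; rfl
    · subst h'; simp
  · have h1 : PySem.Set.contains (PySem.Set.add s x) y = false := by
      cases hh : PySem.Set.contains (PySem.Set.add s x) y
      · rfl
      · exact absurd ((PySem.Set.contains_iff _ y).mp hh) h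
    have h2 : y ∉ s := fun hm => h ((PySem.Set.mem_add s x y).mpr (Or.inl hm))
    have h3 : PySem.Set.contains s y = false := by
      cases hh : PySem.Set.contains s y
      · rfl
      · exact absurd ((PySem.Set.contains_iff s y).mp hh) h2
    have h4 : y ≠ x := fun he => h ((PySem.Set.mem_add s x y).mpr (Or.inr he))
    rw [h1, h3]; simp [h4]

lemma keys_length_size (d : PySem.Dict Int Int) : d.keys.length = d.size := by
  simp [PySem.Dict.keys, PySem.Dict.size]

lemma size_fuel (d : PySem.Dict Int Int) (x : Int) :
    (d.keys.filter (fun y => decide (x ≤ y))).length < d.size + 1 := by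
  have h1 := List.length_filter_le (fun y => decide (x ≤ y)) d.keys
  have h2 := keys_length_size d
  omega

lemma len_fuel (s : PySem.Set Int) (x : Int) :
    (s.filter (fun y => decide (x ≤ y))).length < s.length + 1 := by
  have h1 := List.length_filter_le (fun y => decide (x ≤ y)) s
  omega

-- one step of each loop, from states whose membership tests agree, appends the
-- same room and re-establishes the relation
lemma step_eq (ansA ansB : List Int) (pA : PySem.Dict Int Int) (tB : PySem.Set Int) (room : Int)
    (hInvA : GapInv pA)
    (hEq : ∀ y, pA.contains y = PySem.Set.contains tB y) (hAns : ansA = ansB) :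
    (solutionStepA (ansA, pA) room).1 = (solutionStepB (ansB, tB) room).1 ∧
      (∀ y, (solutionStepA (ansA, pA) room).2.contains y
          = PySem.Set.contains (solutionStepB (ansB, tB) room).2 y) ∧
      GapInv (solutionStepA (ansA, pA) room).2 := by
  -- A side, phase 1: room := find(room) if key else room
  have hfr1 : (if pA.contains room = true then findA (pA.size + 1) room pA else (room, pA)).1
        = ffD pA room ∧
      (∀ y, (if pA.contains room = true then findA (pA.size + 1) room pA else (room, pA)).2.contains y
        = pA.contains y) ∧
      GapInv (if pA.contains room = true then findA (pA.size + 1) room pA else (room, pA)).2 := by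
    by_cases hc : pA.contains room = true
    · rw [if_pos hc]
      obtain ⟨a1, a2, a3, a4⟩ := findA_ok (pA.size + 1) room pA hInvA (size_fuel pA room)
      exact ⟨a1, a3, a4⟩
    · rw [if_neg hc]
      have hc' : pA.contains room = false := by
        cases h : pA.contains room
        · rfl
        · exact absurd h hc
      exact ⟨(ffD_of_not_contains hc').symm, fun _ => rfl, hInvA⟩
  set fr := if pA.contains room = true then findA (pA.size + 1) room pA else (room, pA) with hfrdef
  obtain ⟨ha1, ha3, ha4⟩ := hfr1
  -- A side, phase 2: parent[room'] = find(room'+1)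
  obtain ⟨b1, b2, b3, b4⟩ := findA_ok (fr.2.size + 1) (fr.1 + 1) fr.2 ha4 (size_fuel fr.2 (fr.1 + 1))
  -- B side: the upward scan lands on the same first free room
  obtain ⟨w1, w2, w3⟩ := scanB_ok (tB.length + 1) room tB (len_fuel tB room)
  set rB := scanB (tB.length + 1) room tB with hrBdef
  have hroots : fr.1 = rB := by
    rw [ha1]
    exact ffD_eq_of pA room rB w1 ((hEq rB).trans w2)
      (fun y hy1 hy2 => (hEq y).trans (w3 y hy1 hy2))
  refine ⟨?_, ?_, ?_⟩
  · show ansA ++ [fr.1] = ansB ++ [rB]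
    rw [hAns, hroots]
  · intro y
    show ((findA (fr.2.size + 1) (fr.1 + 1) fr.2).2.insert fr.1
        (findA (fr.2.size + 1) (fr.1 + 1) fr.2).1).contains y
      = PySem.Set.contains (PySem.Set.add tB rB) y
    rw [PySem.Dict.contains_insert, set_contains_add, b3, ha3, hEq, hroots]
    cases PySem.Set.contains tB y <;> by_cases hy : y = rB <;> simp [hy]
  · show GapInv ((findA (fr.2.size + 1) (fr.1 + 1) fr.2).2.insert fr.1
      (findA (fr.2.size + 1) (fr.1 + 1) fr.2).1)
    obtain ⟨g1, g2, g3⟩ := ffD_spec fr.2 (fr.1 + 1)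
    refine inv_insert_fresh b4 (by rw [b1]; omega) ?_
    intro y hy1 hy2
    rw [b3]
    exact g3 y (by omega) (by rw [b1] at hy2; omega)

lemma loop_eq : ∀ (l : List Int) (ansA ansB : List Int) (pA : PySem.Dict Int Int) (tB : PySem.Set Int),
    GapInv pA → (∀ y, pA.contains y = PySem.Set.contains tB y) → ansA = ansB →
    (l.foldl solutionStepA (ansA, pA)).1 = (l.foldl solutionStepB (ansB, tB)).1 := by
  intro l
  induction l with
  | nil => intro ansA ansB pA tB _ _ h; simpa using h
  | cons hd tl ih =>
    intro ansA ansB pA tB hInvA hEq hAns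
    obtain ⟨s1, s2, s3⟩ := step_eq ansA ansB pA tB hd hInvA hEq hAns
    simp only [List.foldl_cons]
    have hA : solutionStepA (ansA, pA) hd =
        ((solutionStepA (ansA, pA) hd).1, (solutionStepA (ansA, pA) hd).2) := rfl
    have hB : solutionStepB (ansB, tB) hd =
        ((solutionStepB (ansB, tB) hd).1, (solutionStepB (ansB, tB) hd).2) := rfl
    rw [hA, hB]
    exact ih _ _ _ _ s3 s2 s1

-- ===== VERDICT (by name: the statement is the Claim_ definition above) =====
theorem solution_spec : Claim_equal_solution := by
  intro k room_number _
  show solution k room_number = solution_alt k room_number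
  unfold solution solution_alt
  exact loop_eq room_number [] [] PySem.Dict.empty PySem.Set.empty
    (fun x v h => by simp [PySem.Dict.get?_empty] at h)
    (fun y => rfl) rfl
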